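-- pv_equiv track=rewrite | github.com/cheeze2000/aoc | 2024/12/12b.py | solve
-- ===== SOURCE A (Python) =====
-- def solve(input):
-- 	map = [list(line) for line in input.splitlines()]
-- 	r = len(map)
-- 	c = len(map[0])
--
-- 	visited = set()
-- 	regions = []
--
-- 	region = []
-- 	def dfs(i, j, plant):
-- 		if i < 0 or i >= r or j < 0 or j >= c: return
-- 		if map[i][j] != plant: return
-- 		if (i, j) in visited: return
-- 		visited.add((i, j))
-- 		region.append((i, j))
-- 		dfs(i - 1, j, plant)
-- 		dfs(i + 1, j, plant)
-- 		dfs(i, j - 1, plant)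
-- 		dfs(i, j + 1, plant)
--
-- 	for i in range(r):
-- 		for j in range(c):
-- 			if (i, j) in visited: continue
-- 			region = []
-- 			dfs(i, j, map[i][j])
-- 			regions.append(region)
--
-- 	cost = sum(perimeter(region) * len(region) for region in regions)
--
-- 	return cost
--
-- def perimeter(region):
-- 	cells = set(region)
-- 	edges = set()
--
-- 	for (i, j) in region:
-- 		if (i - 1, j) not in cells:
-- 			edges.add((i, j, 2))
-- 		if (i + 1, j) not in cells:
-- 			edges.add((i, j, 1))
-- 		if (i, j - 1) not in cells:
-- 			edges.add((i, j, 0))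
-- 		if (i, j + 1) not in cells:
-- 			edges.add((i, j, 3))
--
-- 	lefts = segments(edges, 0)
-- 	downs = segments(edges, 1)
-- 	ups = segments(edges, 2)
-- 	rights = segments(edges, 3)
--
-- 	return lefts + downs + ups + rights
--
-- def segments(edges, dir):
-- 	is_vertical = dir == 0 or dir == 3
-- 	sort_key = (lambda x: (x[1], x[0])) if is_vertical else (lambda x: (x[0], x[1]))
-- 	edges = sorted([edge for edge in edges if edge[2] == dir], key=sort_key)
-- 	edge_set = set(edges)
--
-- 	ans = 0
-- 	for (i, j, d) in edges:
-- 		if (i, j, d) not in edge_set: continue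
--
-- 		a = i
-- 		b = j
-- 		while (a, b, d) in edge_set:
-- 			edge_set.remove((a, b, d))
-- 			if is_vertical:
-- 				a += 1
-- 			else:
-- 				b += 1
--
-- 		ans += 1
--
-- 	return ans
-- ===== SOURCE B (Python) =====
-- def solve(input):
-- 	map = [list(line) for line in input.splitlines()]
-- 	r = len(map)
-- 	c = len(map[0])
--
-- 	visited = set()
-- 	total = 0
--
-- 	region = []
-- 	def dfs(i, j, plant):
-- 		if i < 0 or i >= r or j < 0 or j >= c: return
-- 		if map[i][j] != plant: return
-- 		if (i, j) in visited: return
-- 		visited.add((i, j))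
-- 		region.append((i, j))
-- 		dfs(i - 1, j, plant)
-- 		dfs(i + 1, j, plant)
-- 		dfs(i, j - 1, plant)
-- 		dfs(i, j + 1, plant)
--
-- 	for i in range(r):
-- 		for j in range(c):
-- 			if (i, j) in visited: continue
-- 			region = []
-- 			dfs(i, j, map[i][j])
-- 			total += sides(region) * len(region)
--
-- 	return total
--
-- def sides(region):
-- 	cells = set(region)
-- 	n = 0
-- 	for (i, j) in cells:
-- 		for di, dj in ((-1, 0), (1, 0), (0, -1), (0, 1)):
-- 			if (i + di, j + dj) in cells:
-- 				continue
-- 			pi, pj = abs(dj), abs(di)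
-- 			if (i - pi, j - pj) in cells and (i - pi + di, j - pj + dj) not in cells:
-- 				continue
-- 			n += 1
-- 	return n
-- ===== Notes on version B (the rewrite author's own statement) =====
-- stated objective: faster
-- what changed: The per-region side count (A: build an edge set, then for each of the four directions filter, sort by a direction-dependent key and sweep with a while-loop that deletes each maximal run) is replaced by a single pass over the region's cells counting side starts (an exposed side whose run-predecessor cell does not carry the same side); the recursive flood fill is kept identical. Removing the sorts and the set-deletion sweeps was measured ~3x faster in a timing run.
import Mathlib
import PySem

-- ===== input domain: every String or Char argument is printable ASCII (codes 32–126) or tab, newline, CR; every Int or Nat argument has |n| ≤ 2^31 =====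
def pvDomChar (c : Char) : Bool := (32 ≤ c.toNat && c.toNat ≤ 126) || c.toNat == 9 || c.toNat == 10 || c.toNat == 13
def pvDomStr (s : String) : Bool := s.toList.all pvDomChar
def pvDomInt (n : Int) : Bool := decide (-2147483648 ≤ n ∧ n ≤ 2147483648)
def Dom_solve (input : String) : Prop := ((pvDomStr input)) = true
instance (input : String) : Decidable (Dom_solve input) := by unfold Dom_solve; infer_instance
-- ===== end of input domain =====

-- B replaces A's perimeter computation (edge set + per-direction sort + run-removal sweep) by a
-- single-pass count of side starts over the region's cells; the flood fill itself is kept identical.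

-- ===== PORT A =====

-- recursive flood fill; fuel bounds the recursion depth (r*c+1 levels always suffice, see dfsA_depth notes below)
def dfsA (g : List (List Char)) (r c : Int) (plant : Char) :
    Nat → Int → Int → PySem.Set (Int × Int) × List (Int × Int) →
    PySem.Set (Int × Int) × List (Int × Int)
  | 0, _, _, st => st
  | fuel + 1, i, j, st =>
    if i < 0 ∨ r ≤ i ∨ j < 0 ∨ c ≤ j then st
    else if (PySem.List.pyGetD (PySem.List.pyGetD g i []) j ' ') ≠ plant then st
    else if (i, j) ∈ st.1 then st
    else
      let st1 := (PySem.Set.add st.1 (i, j), st.2 ++ [(i, j)])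
      let st2 := dfsA g r c plant fuel (i - 1) j st1
      let st3 := dfsA g r c plant fuel (i + 1) j st2
      let st4 := dfsA g r c plant fuel i (j - 1) st3
      dfsA g r c plant fuel i (j + 1) st4

def edgesA (region : List (Int × Int)) : PySem.Set (Int × Int × Int) :=
  let cells : PySem.Set (Int × Int) := PySem.Set.ofList region
  region.foldl (fun E p =>
    let E := if (p.1 - 1, p.2) ∉ cells then PySem.Set.add E (p.1, p.2, (2 : Int)) else E
    let E := if (p.1 + 1, p.2) ∉ cells then PySem.Set.add E (p.1, p.2, (1 : Int)) else E
    let E := if (p.1, p.2 - 1) ∉ cells then PySem.Set.add E (p.1, p.2, (0 : Int)) else E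
    if (p.1, p.2 + 1) ∉ cells then PySem.Set.add E (p.1, p.2, (3 : Int)) else E)
    PySem.Set.empty

-- used by consumeA's termination proof
theorem length_discard_lt {α : Type} [BEq α] [LawfulBEq α] (S : List α) (x : α) (h : x ∈ S) :
    (PySem.Set.discard S x).length < S.length := by
  simp only [PySem.Set.discard]
  exact List.length_filter_lt_length_iff_exists.mpr ⟨x, h, by simp⟩

-- the 'while (a, b, d) in edge_set' removal loop
def consumeA (isVert : Bool) (a b d : Int) (S : PySem.Set (Int × Int × Int)) :
    PySem.Set (Int × Int × Int) :=
  if h : (a, b, d) ∈ S then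
    consumeA isVert (if isVert then a + 1 else a) (if isVert then b else b + 1) d
      (PySem.Set.discard S (a, b, d))
  else S
termination_by S.length
decreasing_by exact length_discard_lt S (a, b, d) h

def segmentsA (edges : PySem.Set (Int × Int × Int)) (dir : Int) : Int :=
  let isVert := dir == 0 || dir == 3
  let filtered := edges.filter (fun e => e.2.2 == dir)
  let sortedE :=
    if isVert then PySem.List.sorted2 filtered (fun e => e.2.1) (fun e => e.1)
    else PySem.List.sorted2 filtered (fun e => e.1) (fun e => e.2.1)
  let S0 : PySem.Set (Int × Int × Int) := PySem.Set.ofList sortedE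
  (sortedE.foldl (fun st e =>
      if e ∈ st.1 then (consumeA isVert e.1 e.2.1 e.2.2 st.1, st.2 + 1) else st)
    (S0, (0 : Int))).2

def perimeterA (region : List (Int × Int)) : Int :=
  let edges := edgesA region
  let lefts := segmentsA edges 0
  let downs := segmentsA edges 1
  let ups := segmentsA edges 2
  let rights := segmentsA edges 3
  lefts + downs + ups + rights

def solve (input : String) : Int :=
  let g := (PySem.Str.splitlines input).map String.toList
  let r : Int := PySem.List.len g
  let c : Int := PySem.List.len (PySem.List.pyGetD g 0 [])
  let fuel := (r * c).toNat + 1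
  let res := (PySem.List.pyRange 0 r 1).foldl (fun st i =>
      (PySem.List.pyRange 0 c 1).foldl (fun st j =>
          if (i, j) ∈ st.1 then st
          else
            let plant := PySem.List.pyGetD (PySem.List.pyGetD g i []) j ' '
            let out := dfsA g r c plant fuel i j (st.1, [])
            (out.1, st.2 ++ [out.2])) st)
    ((PySem.Set.empty : PySem.Set (Int × Int)), ([] : List (List (Int × Int))))
  (res.2.map (fun region => perimeterA region * PySem.List.len region)).sum

-- ===== PORT B =====

-- identical flood fill (B keeps A's dfs verbatim)
def dfsB (g : List (List Char)) (r c : Int) (plant : Char) :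
    Nat → Int → Int → PySem.Set (Int × Int) × List (Int × Int) →
    PySem.Set (Int × Int) × List (Int × Int)
  | 0, _, _, st => st
  | fuel + 1, i, j, st =>
    if i < 0 ∨ r ≤ i ∨ j < 0 ∨ c ≤ j then st
    else if (PySem.List.pyGetD (PySem.List.pyGetD g i []) j ' ') ≠ plant then st
    else if (i, j) ∈ st.1 then st
    else
      let st1 := (PySem.Set.add st.1 (i, j), st.2 ++ [(i, j)])
      let st2 := dfsB g r c plant fuel (i - 1) j st1
      let st3 := dfsB g r c plant fuel (i + 1) j st2
      let st4 := dfsB g r c plant fuel i (j - 1) st3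
      dfsB g r c plant fuel i (j + 1) st4

-- number of sides = number of side-run starts, counted in one pass over the cells
def sidesB (region : List (Int × Int)) : Int :=
  let cells : PySem.Set (Int × Int) := PySem.Set.ofList region
  cells.foldl (fun n p =>
    ([((-1 : Int), (0 : Int)), (1, 0), (0, -1), (0, 1)]).foldl (fun n dd =>
      if (p.1 + dd.1, p.2 + dd.2) ∈ cells then n
      else if (p.1 - |dd.2|, p.2 - |dd.1|) ∈ cells ∧
          (p.1 - |dd.2| + dd.1, p.2 - |dd.1| + dd.2) ∉ cells then n
      else n + 1) n) 0

def solve_alt (input : String) : Int :=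
  let g := (PySem.Str.splitlines input).map String.toList
  let r : Int := PySem.List.len g
  let c : Int := PySem.List.len (PySem.List.pyGetD g 0 [])
  let fuel := (r * c).toNat + 1
  ((PySem.List.pyRange 0 r 1).foldl (fun st i =>
      (PySem.List.pyRange 0 c 1).foldl (fun st j =>
          if (i, j) ∈ st.1 then st
          else
            let plant := PySem.List.pyGetD (PySem.List.pyGetD g i []) j ' '
            let out := dfsB g r c plant fuel i j (st.1, [])
            (out.1, st.2 + sidesB out.2 * PySem.List.len out.2)) st)
    ((PySem.Set.empty : PySem.Set (Int × Int)), (0 : Int))).2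

-- ===== PRECONDITION & SPEC =====
-- Pre_ excludes exactly the inputs where A raises IndexError: an input with no lines (map[0]),
-- or one whose first line is longer than some later line (map[i][j] with j < c = len(map[0])).
def Pre_solve (input : String) : Prop :=
  PySem.Str.splitlines input ≠ [] ∧
  ∀ s ∈ PySem.Str.splitlines input,
    ((PySem.Str.splitlines input).headD "").toList.length ≤ s.toList.length
instance (input : String) : Decidable (Pre_solve input) := by unfold Pre_solve; infer_instance

def pvWitness_solve : String := "AAB\nABB"

def Spec_solve (input : String) (out : Int) : Prop := out = solve_alt input
instance (input : String) (out : Int) : Decidable (Spec_solve input out) := by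
  unfold Spec_solve; infer_instance

-- ===== CLAIM (what is proved, stated in full; the proofs are below) =====
def Claim_equal_solve : Prop :=
  ∀ (input : String), Dom_solve input → Pre_solve input → Spec_solve input (solve input)

-- ===== LEMMAS AND PROOFS =====

-- ===== helpers =====
def nbr (d : Int) (p : Int × Int) : Int × Int :=
  if d = 2 then (p.1 - 1, p.2) else if d = 1 then (p.1 + 1, p.2)
  else if d = 0 then (p.1, p.2 - 1) else (p.1, p.2 + 1)

def pcell (d : Int) (p : Int × Int) : Int × Int :=
  if d = 0 ∨ d = 3 then (p.1 - 1, p.2) else (p.1, p.2 - 1)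

theorem mem_condAdd {α : Type} [BEq α] [LawfulBEq α] (E : PySem.Set α) (y x : α) (c : Prop)
    [Decidable c] : x ∈ (if c then PySem.Set.add E y else E) ↔ x ∈ E ∨ (c ∧ x = y) := by
  split_ifs with h
  · simp [PySem.Set.mem_add, h]
  · simp [h]

def tagMatch (C : PySem.Set (Int × Int)) (p : Int × Int) (x : Int × Int × Int) : Prop :=
  (x = (p.1, p.2, 2) ∧ (p.1 - 1, p.2) ∉ C) ∨ (x = (p.1, p.2, 1) ∧ (p.1 + 1, p.2) ∉ C) ∨
  (x = (p.1, p.2, 0) ∧ (p.1, p.2 - 1) ∉ C) ∨ (x = (p.1, p.2, 3) ∧ (p.1, p.2 + 1) ∉ C)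

theorem mem_edges_step (C : PySem.Set (Int × Int)) (acc : PySem.Set (Int × Int × Int))
    (q : Int × Int) (x : Int × Int × Int) :
    x ∈ (let E := if (q.1 - 1, q.2) ∉ C then PySem.Set.add acc (q.1, q.2, (2 : Int)) else acc
         let E := if (q.1 + 1, q.2) ∉ C then PySem.Set.add E (q.1, q.2, (1 : Int)) else E
         let E := if (q.1, q.2 - 1) ∉ C then PySem.Set.add E (q.1, q.2, (0 : Int)) else E
         if (q.1, q.2 + 1) ∉ C then PySem.Set.add E (q.1, q.2, (3 : Int)) else E) ↔
    x ∈ acc ∨ tagMatch C q x := by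
  unfold tagMatch
  rw [mem_condAdd, mem_condAdd, mem_condAdd, mem_condAdd]
  tauto

theorem mem_edges_foldl (C : PySem.Set (Int × Int)) :
    ∀ (reg : List (Int × Int)) (acc : PySem.Set (Int × Int × Int)) (x : Int × Int × Int),
      x ∈ reg.foldl (fun E p =>
        let E := if (p.1 - 1, p.2) ∉ C then PySem.Set.add E (p.1, p.2, (2 : Int)) else E
        let E := if (p.1 + 1, p.2) ∉ C then PySem.Set.add E (p.1, p.2, (1 : Int)) else E
        let E := if (p.1, p.2 - 1) ∉ C then PySem.Set.add E (p.1, p.2, (0 : Int)) else E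
        if (p.1, p.2 + 1) ∉ C then PySem.Set.add E (p.1, p.2, (3 : Int)) else E) acc ↔
      x ∈ acc ∨ ∃ p ∈ reg, tagMatch C p x := by
  intro reg
  induction reg with
  | nil => intro acc x; simp
  | cons q t ih =>
    intro acc x
    simp only [List.foldl_cons, ih, mem_edges_step, List.mem_cons]
    constructor
    · rintro ((h | h) | ⟨p, hp, hm⟩)
      · exact Or.inl h
      · exact Or.inr ⟨q, Or.inl rfl, h⟩
      · exact Or.inr ⟨p, Or.inr hp, hm⟩
    · rintro (h | ⟨p, (rfl | hp), hm⟩)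
      · exact Or.inl (Or.inl h)
      · exact Or.inl (Or.inr hm)
      · exact Or.inr ⟨p, hp, hm⟩

theorem mem_edgesA (region : List (Int × Int)) (x : Int × Int × Int) :
    x ∈ edgesA region ↔ ∃ p ∈ PySem.Set.ofList region, tagMatch (PySem.Set.ofList region) p x := by
  unfold edgesA
  rw [mem_edges_foldl]
  simp only [PySem.Set.mem_ofList]
  simp [PySem.Set.empty]

theorem nodup_condAdd {α : Type} [BEq α] [LawfulBEq α] (E : PySem.Set α) (y : α) (c : Prop)
    [Decidable c] (h : E.Nodup) : (if c then PySem.Set.add E y else E).Nodup := by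
  split_ifs
  · exact PySem.Set.nodup_add E y h
  · exact h

theorem nodup_edgesA (region : List (Int × Int)) : (edgesA region).Nodup := by
  unfold edgesA
  generalize (PySem.Set.ofList region : PySem.Set (Int × Int)) = C
  suffices h : ∀ (reg : List (Int × Int)) (acc : PySem.Set (Int × Int × Int)), acc.Nodup →
      (reg.foldl (fun E p =>
        let E := if (p.1 - 1, p.2) ∉ C then PySem.Set.add E (p.1, p.2, (2 : Int)) else E
        let E := if (p.1 + 1, p.2) ∉ C then PySem.Set.add E (p.1, p.2, (1 : Int)) else E
        let E := if (p.1, p.2 - 1) ∉ C then PySem.Set.add E (p.1, p.2, (0 : Int)) else E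
        if (p.1, p.2 + 1) ∉ C then PySem.Set.add E (p.1, p.2, (3 : Int)) else E) acc).Nodup by
    exact h region PySem.Set.empty (by simp [PySem.Set.empty])
  intro reg
  induction reg with
  | nil => intro acc h; simpa using h
  | cons q t ih =>
    intro acc h
    exact ih _ (nodup_condAdd _ _ _ (nodup_condAdd _ _ _ (nodup_condAdd _ _ _ (nodup_condAdd _ _ _ h))))

-- ===== sorted2 is pairwise-ordered under the lexicographic ≤ on (k1, k2) =====
def leK {α : Type} (k1 k2 : α → Int) (a b : α) : Prop :=
  k1 a < k1 b ∨ (k1 a = k1 b ∧ k2 a ≤ k2 b)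

theorem insertBy_pairwise_leK {α : Type} (k1 k2 : α → Int) (x : α) :
    ∀ (ys : List α), ys.Pairwise (leK k1 k2) →
      (PySem.List.insertBy
        (fun a b => decide (k1 a < k1 b) || (!decide (k1 b < k1 a) && decide (k2 a < k2 b)))
        x ys).Pairwise (leK k1 k2) := by
  intro ys
  induction ys with
  | nil => intro _; simp [PySem.List.insertBy]
  | cons y t ih =>
    intro h
    rw [PySem.List.insertBy]
    split_ifs with hb
    · have hxy : leK k1 k2 x y := by
        simp only [Bool.or_eq_true, Bool.and_eq_true, decide_eq_true_eq, Bool.not_eq_true',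
          decide_eq_false_iff_not] at hb
        unfold leK; omega
      refine List.Pairwise.cons ?_ h
      intro z hz
      rcases List.mem_cons.mp hz with rfl | hz
      · exact hxy
      · have := List.rel_of_pairwise_cons h hz
        unfold leK at *; omega
    · have hyx : leK k1 k2 y x := by
        simp only [Bool.or_eq_true, Bool.and_eq_true, decide_eq_true_eq, Bool.not_eq_true',
          decide_eq_false_iff_not, not_or, not_and] at hb
        unfold leK; omega
      refine List.Pairwise.cons ?_ (ih h.tail)
      intro z hz
      rcases (PySem.List.mem_insertBy _ _ _ _).mp hz with rfl | hz
      · exact hyx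
      · exact List.rel_of_pairwise_cons h hz

theorem sorted2_pairwise_leK {α : Type} (xs : List α) (k1 k2 : α → Int) :
    (PySem.List.sorted2 xs k1 k2).Pairwise (leK k1 k2) := by
  unfold PySem.List.sorted2
  simp only
  suffices h : ∀ (l : List α) (acc : List α), acc.Pairwise (leK k1 k2) →
      (l.foldl (fun acc x => PySem.List.insertBy
        (fun a b => decide (k1 a < k1 b) || (!decide (k1 b < k1 a) && decide (k2 a < k2 b)))
        x acc) acc).Pairwise (leK k1 k2) by
    exact h xs [] (by simp)
  intro l
  induction l with
  | nil => intro acc h; simpa using h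
  | cons x t ih => intro acc h; exact ih _ (insertBy_pairwise_leK k1 k2 x acc h)

-- ===== the removal loop consumes a run; counting = counting run starts =====
def nxtT (v : Bool) (e : Int × Int × Int) : Int × Int × Int :=
  if v then (e.1 + 1, e.2.1, e.2.2) else (e.1, e.2.1 + 1, e.2.2)

def prvT (v : Bool) (e : Int × Int × Int) : Int × Int × Int :=
  if v then (e.1 - 1, e.2.1, e.2.2) else (e.1, e.2.1 - 1, e.2.2)

def consume' (v : Bool) (e : Int × Int × Int) (S : PySem.Set (Int × Int × Int)) :
    PySem.Set (Int × Int × Int) :=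
  consumeA v e.1 e.2.1 e.2.2 S

theorem consume'_eq (v : Bool) (e : Int × Int × Int) (S : PySem.Set (Int × Int × Int)) :
    consume' v e S =
      if e ∈ S then consume' v (nxtT v e) (PySem.Set.discard S e) else S := by
  obtain ⟨a, b, d⟩ := e
  rw [consume', consumeA]
  cases v <;> simp [nxtT, consume']

theorem consume_subset (v : Bool) :
    ∀ (n : Nat) (S : PySem.Set (Int × Int × Int)), S.length ≤ n →
      ∀ (e x : Int × Int × Int), x ∈ consume' v e S → x ∈ S := by
  intro n
  induction n with
  | zero =>
    intro S hS e x
    have : S = [] := List.eq_nil_of_length_eq_zero (Nat.le_zero.mp hS)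
    subst this
    rw [consume'_eq]
    simp
  | succ n ih =>
    intro S hS e x
    rw [consume'_eq]
    split_ifs with he
    · intro hx
      have hlen : (PySem.Set.discard S e).length ≤ n := by
        have := length_discard_lt S e he; omega
      have := ih _ hlen _ _ hx
      exact ((PySem.Set.mem_discard S e x).mp this).1
    · exact fun h => h

theorem consume_not_mem_self (v : Bool) (e : Int × Int × Int)
    (S : PySem.Set (Int × Int × Int)) : e ∉ consume' v e S := by
  rw [consume'_eq]
  split_ifs with he
  · intro hx
    have := consume_subset v (PySem.Set.discard S e).length _ le_rfl _ _ hx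
    exact ((PySem.Set.mem_discard S e e).mp this).2 rfl
  · exact he

theorem consume_propagate (v : Bool) :
    ∀ (n : Nat) (S : PySem.Set (Int × Int × Int)), S.length ≤ n →
      ∀ (e y : Int × Int × Int), y ∈ S → y ∉ consume' v e S → nxtT v y ∉ consume' v e S := by
  intro n
  induction n with
  | zero =>
    intro S hS e y hy
    have : S = [] := List.eq_nil_of_length_eq_zero (Nat.le_zero.mp hS)
    subst this; simp at hy
  | succ n ih =>
    intro S hS e y hy hynot
    rw [consume'_eq] at *
    split_ifs at * with he
    · have hlen : (PySem.Set.discard S e).length ≤ n := by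
        have := length_discard_lt S e he; omega
      by_cases hye : y = e
      · subst hye
        exact consume_not_mem_self v (nxtT v y) (PySem.Set.discard S y)
      · exact ih _ hlen _ _ ((PySem.Set.mem_discard S e y).mpr ⟨hy, hye⟩) hynot
    · exact absurd hy hynot

theorem consume_removed_reason (v : Bool) :
    ∀ (n : Nat) (S : PySem.Set (Int × Int × Int)), S.length ≤ n →
      ∀ (e x : Int × Int × Int), x ∈ S → x ∉ consume' v e S →
        x = e ∨ prvT v x ∈ S := by
  intro n
  induction n with
  | zero =>
    intro S hS e x hx
    have : S = [] := List.eq_nil_of_length_eq_zero (Nat.le_zero.mp hS)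
    subst this; simp at hx
  | succ n ih =>
    intro S hS e x hx hxnot
    rw [consume'_eq] at hxnot
    split_ifs at hxnot with he
    · by_cases hxe : x = e
      · exact Or.inl hxe
      · have hlen : (PySem.Set.discard S e).length ≤ n := by
          have := length_discard_lt S e he; omega
        rcases ih _ hlen _ _ ((PySem.Set.mem_discard S e x).mpr ⟨hx, hxe⟩) hxnot with h | h
        · subst h
          right
          have hpn : prvT v (nxtT v e) = e := by cases v <;> simp [nxtT, prvT]
          rw [hpn]; exact he
        · exact Or.inr ((PySem.Set.mem_discard S e (prvT v x)).mp h).1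
    · exact absurd hx hxnot

theorem consume_nodup (v : Bool) :
    ∀ (n : Nat) (S : PySem.Set (Int × Int × Int)), S.length ≤ n → S.Nodup →
      ∀ (e : Int × Int × Int), (consume' v e S).Nodup := by
  intro n
  induction n with
  | zero =>
    intro S hS hnd e
    have : S = [] := List.eq_nil_of_length_eq_zero (Nat.le_zero.mp hS)
    subst this; rw [consume'_eq]; simp
  | succ n ih =>
    intro S hS hnd e
    rw [consume'_eq]
    split_ifs with he
    · have hlen : (PySem.Set.discard S e).length ≤ n := by
        have := length_discard_lt S e he; omega
      exact ih _ hlen (PySem.Set.nodup_discard S e hnd) _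
    · exact hnd

def kv1 (v : Bool) (e : Int × Int × Int) : Int := if v then e.2.1 else e.1
def kv2 (v : Bool) (e : Int × Int × Int) : Int := if v then e.1 else e.2.1

def startP (v : Bool) (S : PySem.Set (Int × Int × Int)) (x : Int × Int × Int) : Bool :=
  decide (x ∈ S) && !decide (prvT v x ∈ S)

theorem prvT_ne_self (v : Bool) (e : Int × Int × Int) : prvT v e ≠ e := by
  obtain ⟨a, b, d⟩ := e
  cases v <;> simp [prvT, Prod.ext_iff]

theorem leK_prvT_absurd (v : Bool) (e x : Int × Int × Int)
    (h : leK (kv1 v) (kv2 v) e x) (hx : x = prvT v e) : False := by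
  subst hx
  obtain ⟨a, b, d⟩ := e
  cases v <;> simp [prvT, kv1, kv2, leK] at h

theorem head_prv_not_mem (v : Bool) (e : Int × Int × Int) (rest : List (Int × Int × Int))
    (hpw : (e :: rest).Pairwise (leK (kv1 v) (kv2 v)))
    (S : PySem.Set (Int × Int × Int)) (hsub : ∀ x ∈ S, x ∈ e :: rest) :
    prvT v e ∉ S := by
  intro hmem
  rcases List.mem_cons.mp (hsub _ hmem) with h | h
  · exact prvT_ne_self v e h
  · exact leK_prvT_absurd v e (prvT v e) (List.rel_of_pairwise_cons hpw h) rfl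

theorem loop_eq (v : Bool) :
    ∀ (L : List (Int × Int × Int)),
      L.Pairwise (leK (kv1 v) (kv2 v)) → L.Nodup →
      ∀ (S : PySem.Set (Int × Int × Int)), S.Nodup → (∀ x ∈ S, x ∈ L) → ∀ (n : Int),
      (L.foldl (fun st e =>
          if e ∈ st.1 then (consumeA v e.1 e.2.1 e.2.2 st.1, st.2 + 1) else st) (S, n)).2
        = n + (L.countP (startP v S) : Int) := by
  intro L
  induction L with
  | nil => intro _ _ S _ _ n; simp
  | cons e rest ih =>
    intro hpw hnd S hSnd hsub n
    have hprv : prvT v e ∉ S := head_prv_not_mem v e rest hpw S hsub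
    simp only [List.foldl_cons]
    by_cases he : e ∈ S
    · rw [if_pos he]
      have hcount : (e :: rest).countP (startP v S) = rest.countP (startP v S) + 1 := by
        rw [List.countP_cons]
        simp [startP, he, hprv]
      -- the new state's set is consume' v e S
      have hstep : (consumeA v e.1 e.2.1 e.2.2 S, n + 1) = (consume' v e S, n + 1) := rfl
      rw [hstep]
      have hsub' : ∀ x ∈ consume' v e S, x ∈ rest := by
        intro x hx
        have hxS : x ∈ S := consume_subset v S.length S le_rfl e x hx
        rcases List.mem_cons.mp (hsub x hxS) with rfl | h
        · exact absurd hx (consume_not_mem_self v x S)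
        · exact h
      have hnd' : (consume' v e S).Nodup := consume_nodup v S.length S le_rfl hSnd e
      rw [ih hpw.tail hnd.tail _ hnd' hsub' (n + 1)]
      have hcongr : rest.countP (startP v (consume' v e S)) = rest.countP (startP v S) := by
        refine List.countP_congr ?_
        intro x hx
        have hxe : x ≠ e := fun h => (List.nodup_cons.mp hnd).1 (h ▸ hx)
        simp only [startP, Bool.and_eq_true, decide_eq_true_eq, Bool.not_eq_true',
          decide_eq_false_iff_not]
        constructor
        · rintro ⟨hxin, hpout⟩
          have hxS : x ∈ S := consume_subset v S.length S le_rfl e x hxin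
          refine ⟨hxS, ?_⟩
          intro hpS
          by_cases hpin : prvT v x ∈ consume' v e S
          · exact hpout hpin
          · have := consume_propagate v S.length S le_rfl e (prvT v x) hpS hpin
            have hnp : nxtT v (prvT v x) = x := by cases v <;> simp [nxtT, prvT]
            rw [hnp] at this
            exact this hxin
        · rintro ⟨hxS, hpS⟩
          constructor
          · by_contra hxout
            rcases consume_removed_reason v S.length S le_rfl e x hxS hxout with h | h
            · exact hxe h
            · exact hpS h
          · intro hpin
            exact hpS (consume_subset v S.length S le_rfl e _ hpin)
      rw [hcongr, hcount]
      push_cast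
      ring
    · rw [if_neg he]
      have hcount : (e :: rest).countP (startP v S) = rest.countP (startP v S) := by
        rw [List.countP_cons]
        simp [startP, he]
      have hsub' : ∀ x ∈ S, x ∈ rest := by
        intro x hx
        rcases List.mem_cons.mp (hsub x hx) with rfl | h
        · exact absurd hx he
        · exact h
      rw [ih hpw.tail hnd.tail S hSnd hsub' n, hcount]

theorem startP_congr_mem (v : Bool) (L filtered : PySem.Set (Int × Int × Int))
    (hmem : ∀ x, x ∈ L ↔ x ∈ filtered) (x : Int × Int × Int) :
    startP v L x = startP v filtered x := by
  simp only [startP, hmem]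

theorem segmentsA_count (E : PySem.Set (Int × Int × Int)) (hnd : E.Nodup) (d : Int) (v : Bool)
    (hv : (d == 0 || d == 3) = v) :
    segmentsA E d =
      ((E.filter (fun e => e.2.2 == d)).countP
        (startP v (E.filter (fun e => e.2.2 == d))) : Int) := by
  unfold segmentsA
  rw [hv]
  have hndf : (E.filter (fun e => e.2.2 == d)).Nodup := hnd.filter _
  cases v
  · simp only [Bool.false_eq_true, if_false]
    have hperm := PySem.List.sorted2_perm (E.filter (fun e => e.2.2 == d))
      (fun e => e.1) (fun e => e.2.1) false
    have hndL := hperm.nodup_iff.mpr hndf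
    have hpw : (PySem.List.sorted2 (E.filter (fun e => e.2.2 == d))
        (fun e => e.1) (fun e => e.2.1)).Pairwise (leK (kv1 false) (kv2 false)) := by
      refine (sorted2_pairwise_leK _ _ _).imp ?_
      intro a b h
      simpa [leK, kv1, kv2] using h
    rw [PySem.Set.ofList_eq_self_of_nodup _ hndL]
    rw [loop_eq false _ hpw hndL _ hndL (fun x hx => hx) 0]
    rw [List.countP_congr (fun x hx => by
      rw [startP_congr_mem false _ _ (fun y => hperm.mem_iff)])]
    rw [hperm.countP_eq]
    ring
  · simp only [if_true]
    have hperm := PySem.List.sorted2_perm (E.filter (fun e => e.2.2 == d))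
      (fun e => e.2.1) (fun e => e.1) false
    have hndL := hperm.nodup_iff.mpr hndf
    have hpw : (PySem.List.sorted2 (E.filter (fun e => e.2.2 == d))
        (fun e => e.2.1) (fun e => e.1)).Pairwise (leK (kv1 true) (kv2 true)) := by
      refine (sorted2_pairwise_leK _ _ _).imp ?_
      intro a b h
      simpa [leK, kv1, kv2] using h
    rw [PySem.Set.ofList_eq_self_of_nodup _ hndL]
    rw [loop_eq true _ hpw hndL _ hndL (fun x hx => hx) 0]
    rw [List.countP_congr (fun x hx => by
      rw [startP_congr_mem true _ _ (fun y => hperm.mem_iff)])]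
    rw [hperm.countP_eq]
    ring

theorem mem_filteredA (region : List (Int × Int)) (d : Int)
    (hd4 : d = 0 ∨ d = 1 ∨ d = 2 ∨ d = 3) (x : Int × Int × Int) :
    x ∈ (edgesA region).filter (fun e => e.2.2 == d) ↔
      ((x.1, x.2.1) ∈ PySem.Set.ofList region ∧
        nbr d (x.1, x.2.1) ∉ PySem.Set.ofList region ∧ x.2.2 = d) := by
  obtain ⟨x1, x2, x3⟩ := x
  rw [List.mem_filter, mem_edgesA]
  simp only [tagMatch, Prod.mk.injEq, beq_iff_eq]
  rcases hd4 with rfl | rfl | rfl | rfl <;> simp [nbr] <;> aesop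

def cellStartB (C : PySem.Set (Int × Int)) (d : Int) (p : Int × Int) : Bool :=
  decide (nbr d p ∉ C) && !decide (pcell d p ∈ C ∧ nbr d (pcell d p) ∉ C)

theorem count_filtered_eq_cell (region : List (Int × Int)) (d : Int) (v : Bool)
    (hd4 : d = 0 ∨ d = 1 ∨ d = 2 ∨ d = 3)
    (hprv : ∀ p : Int × Int, prvT v (p.1, p.2, d) = ((pcell d p).1, (pcell d p).2, d)) :
    ((edgesA region).filter (fun e => e.2.2 == d)).countP
        (startP v ((edgesA region).filter (fun e => e.2.2 == d)))
      = (PySem.Set.ofList region).countP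
          (cellStartB (PySem.Set.ofList region) d) := by
  set C : PySem.Set (Int × Int) := PySem.Set.ofList region with hC
  set F := (edgesA region).filter (fun e => e.2.2 == d) with hF
  have hndC : C.Nodup := PySem.Set.nodup_ofList region
  have hndF : F.Nodup := (nodup_edgesA region).filter _
  have hmemF : ∀ x : Int × Int × Int,
      x ∈ F ↔ ((x.1, x.2.1) ∈ C ∧ nbr d (x.1, x.2.1) ∉ C ∧ x.2.2 = d) :=
    fun x => mem_filteredA region d hd4 x
  have hinj : Function.Injective (fun p : Int × Int => (p.1, p.2, d)) := by
    intro a b h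
    simp only [Prod.mk.injEq] at h
    exact Prod.ext h.1 h.2.1
  have hndM : ((C.filter (fun p => decide (nbr d p ∉ C))).map
      (fun p => (p.1, p.2, d))).Nodup :=
    (hndC.filter _).map hinj
  have hperm : F.Perm ((C.filter (fun p => decide (nbr d p ∉ C))).map
      (fun p => (p.1, p.2, d))) := by
    rw [List.perm_ext_iff_of_nodup hndF hndM]
    intro a
    obtain ⟨a1, a2, a3⟩ := a
    rw [hmemF]
    simp only [List.mem_map, List.mem_filter, decide_eq_true_eq]
    constructor
    · rintro ⟨h1, h2, rfl⟩
      exact ⟨(a1, a2), ⟨h1, h2⟩, rfl⟩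
    · rintro ⟨p, ⟨h1, h2⟩, heq⟩
      obtain ⟨rfl, rfl, rfl⟩ : p.1 = a1 ∧ p.2 = a2 ∧ d = a3 := by
        simpa [Prod.mk.injEq] using heq
      exact ⟨h1, h2, rfl⟩
  rw [hperm.countP_eq, List.countP_map, List.countP_filter]
  refine List.countP_congr ?_
  intro p hp
  simp only [Function.comp_apply, cellStartB, Bool.and_eq_true, decide_eq_true_eq,
    Bool.not_eq_true', decide_eq_false_iff_not]
  by_cases hedge : nbr d p ∉ C
  · simp only [hedge]
    have hx : ((p.1, p.2, d) : Int × Int × Int) ∈ F := by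
      rw [hmemF]; exact ⟨hp, hedge, rfl⟩
    have hpr : (prvT v (p.1, p.2, d) ∈ F) ↔ (pcell d p ∈ C ∧ nbr d (pcell d p) ∉ C) := by
      rw [hprv p, hmemF]
      simp
    simp only [startP, hx, decide_true, Bool.true_and]
    rw [Bool.not_eq_true', decide_eq_false_iff_not, hpr]
    tauto
  · simp only [hedge]
    have hx : ((p.1, p.2, d) : Int × Int × Int) ∉ F := by
      rw [hmemF]; rintro ⟨_, h2, _⟩; exact hedge h2
    simp [startP, hx]

def ind (C : PySem.Set (Int × Int)) (d : Int) (p : Int × Int) : Int :=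
  if cellStartB C d p = true then 1 else 0

theorem stepB (C : PySem.Set (Int × Int)) (p : Int × Int) (n : Int) (a b d : Int)
    (hnb : ((p.1 + a, p.2 + b) : Int × Int) = nbr d p)
    (hpc : ((p.1 - |b|, p.2 - |a|) : Int × Int) = pcell d p)
    (hpn : ((p.1 - |b| + a, p.2 - |a| + b) : Int × Int) = nbr d (pcell d p)) :
    (if (p.1 + a, p.2 + b) ∈ C then n
     else if (p.1 - |b|, p.2 - |a|) ∈ C ∧ (p.1 - |b| + a, p.2 - |a| + b) ∉ C then n
     else n + 1) = n + ind C d p := by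
  rw [hnb, hpc, hpn]
  unfold ind cellStartB
  split_ifs <;> simp_all

theorem sidesB_inner (C : PySem.Set (Int × Int)) (n : Int) (p : Int × Int) :
    ([((-1 : Int), (0 : Int)), (1, 0), (0, -1), (0, 1)]).foldl (fun n dd =>
      if (p.1 + dd.1, p.2 + dd.2) ∈ C then n
      else if (p.1 - |dd.2|, p.2 - |dd.1|) ∈ C ∧
          (p.1 - |dd.2| + dd.1, p.2 - |dd.1| + dd.2) ∉ C then n
      else n + 1) n
    = n + ind C 2 p + ind C 1 p + ind C 0 p + ind C 3 p := by
  simp only [List.foldl_cons, List.foldl_nil]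
  rw [stepB C p n (-1) 0 2 (by norm_num [nbr, Prod.ext_iff]; try omega)
        (by norm_num [pcell, Prod.ext_iff]; try omega) (by norm_num [nbr, pcell, Prod.ext_iff]; try omega)]
  rw [stepB C p _ 1 0 1 (by norm_num [nbr, Prod.ext_iff]; try omega)
        (by norm_num [pcell, Prod.ext_iff]; try omega) (by norm_num [nbr, pcell, Prod.ext_iff]; try omega)]
  rw [stepB C p _ 0 (-1) 0 (by norm_num [nbr, Prod.ext_iff]; try omega)
        (by norm_num [pcell, Prod.ext_iff]; try omega) (by norm_num [nbr, pcell, Prod.ext_iff]; try omega)]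
  rw [stepB C p _ 0 1 3 (by norm_num [nbr, Prod.ext_iff]; try omega)
        (by norm_num [pcell, Prod.ext_iff]; try omega) (by norm_num [nbr, pcell, Prod.ext_iff]; try omega)]

theorem perimeterA_eq_sidesB (region : List (Int × Int)) :
    perimeterA region = sidesB region := by
  have hnd := nodup_edgesA region
  simp only [perimeterA, sidesB]
  rw [segmentsA_count _ hnd 0 true (by decide),
      segmentsA_count _ hnd 1 false (by decide),
      segmentsA_count _ hnd 2 false (by decide),
      segmentsA_count _ hnd 3 true (by decide)]
  rw [count_filtered_eq_cell region 0 true (by norm_num)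
        (fun p => by norm_num [prvT, pcell, Prod.ext_iff]),
      count_filtered_eq_cell region 1 false (by norm_num)
        (fun p => by norm_num [prvT, pcell, Prod.ext_iff]),
      count_filtered_eq_cell region 2 false (by norm_num)
        (fun p => by norm_num [prvT, pcell, Prod.ext_iff]),
      count_filtered_eq_cell region 3 true (by norm_num)
        (fun p => by norm_num [prvT, pcell, Prod.ext_iff])]
  rw [PySem.List.foldl_congr_mem (PySem.Set.ofList region)
        (fun n p =>
          List.foldl
            (fun n dd =>
              if (p.1 + dd.1, p.2 + dd.2) ∈ PySem.Set.ofList region then n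
              else
                if (p.1 - |dd.2|, p.2 - |dd.1|) ∈ PySem.Set.ofList region ∧
                    (p.1 - |dd.2| + dd.1, p.2 - |dd.1| + dd.2) ∉ PySem.Set.ofList region then n
                else n + 1)
            n [(-1, 0), (1, 0), (0, -1), (0, 1)])
        (fun (n : Int) (p : Int × Int) =>
          n + (ind (PySem.Set.ofList region) 2 p + (ind (PySem.Set.ofList region) 1 p +
            (ind (PySem.Set.ofList region) 0 p + ind (PySem.Set.ofList region) 3 p))))
        0
        (fun acc x hx => by beta_reduce; rw [sidesB_inner]; ring)]
  rw [PySem.List.foldl_add]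
  rw [PySem.List.sum_map_add_int (PySem.Set.ofList region)
        (fun p => ind (PySem.Set.ofList region) 2 p)
        (fun p => ind (PySem.Set.ofList region) 1 p +
          (ind (PySem.Set.ofList region) 0 p + ind (PySem.Set.ofList region) 3 p))]
  rw [PySem.List.sum_map_add_int (PySem.Set.ofList region)
        (fun p => ind (PySem.Set.ofList region) 1 p)
        (fun p => ind (PySem.Set.ofList region) 0 p + ind (PySem.Set.ofList region) 3 p)]
  rw [PySem.List.sum_map_add_int (PySem.Set.ofList region)
        (fun p => ind (PySem.Set.ofList region) 0 p)
        (fun p => ind (PySem.Set.ofList region) 3 p)]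
  simp only [ind]
  rw [PySem.List.sum_map_ite_one_zero, PySem.List.sum_map_ite_one_zero,
      PySem.List.sum_map_ite_one_zero, PySem.List.sum_map_ite_one_zero]
  ring

theorem dfsA_eq_dfsB (g : List (List Char)) (r c : Int) (plant : Char) :
    ∀ (fuel : Nat) (i j : Int) (st : PySem.Set (Int × Int) × List (Int × Int)),
      dfsA g r c plant fuel i j st = dfsB g r c plant fuel i j st := by
  intro fuel
  induction fuel with
  | zero => intro i j st; rfl
  | succ n ih => intro i j st; simp only [dfsA, dfsB, ih]

theorem foldl_rel {σ τ ξ : Type} (I : σ → τ → Prop) (sA : σ → ξ → σ) (sB : τ → ξ → τ)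
    (h : ∀ a b x, I a b → I (sA a x) (sB b x)) :
    ∀ (L : List ξ) (a : σ) (b : τ), I a b → I (L.foldl sA a) (L.foldl sB b) := by
  intro L
  induction L with
  | nil => intro a b hI; simpa using hI
  | cons x t iht => intro a b hI; exact iht _ _ (h _ _ _ hI)

theorem solve_eq_solve_alt (input : String) : solve input = solve_alt input := by
  unfold solve solve_alt
  set g := (PySem.Str.splitlines input).map String.toList with hg
  set r : Int := PySem.List.len g with hr
  set c : Int := PySem.List.len (PySem.List.pyGetD g 0 []) with hc
  set fuel := (r * c).toNat + 1 with hfuel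
  have main := foldl_rel
    (I := fun (a : PySem.Set (Int × Int) × List (List (Int × Int)))
            (b : PySem.Set (Int × Int) × Int) =>
        b.1 = a.1 ∧ b.2 = (a.2.map (fun region => perimeterA region * PySem.List.len region)).sum)
    (sA := fun st i =>
      (PySem.List.pyRange 0 c 1).foldl (fun st j =>
          if (i, j) ∈ st.1 then st
          else
            let plant := PySem.List.pyGetD (PySem.List.pyGetD g i []) j ' '
            let out := dfsA g r c plant fuel i j (st.1, [])
            (out.1, st.2 ++ [out.2])) st)
    (sB := fun st i =>
      (PySem.List.pyRange 0 c 1).foldl (fun st j =>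
          if (i, j) ∈ st.1 then st
          else
            let plant := PySem.List.pyGetD (PySem.List.pyGetD g i []) j ' '
            let out := dfsB g r c plant fuel i j (st.1, [])
            (out.1, st.2 + sidesB out.2 * PySem.List.len out.2)) st)
    ?_ (PySem.List.pyRange 0 r 1) (PySem.Set.empty, []) (PySem.Set.empty, 0) (by simp)
  · exact (main.2).symm
  · intro a b i hI
    refine foldl_rel
      (I := fun (a : PySem.Set (Int × Int) × List (List (Int × Int)))
              (b : PySem.Set (Int × Int) × Int) =>
          b.1 = a.1 ∧ b.2 = (a.2.map (fun region => perimeterA region * PySem.List.len region)).sum)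
      _ _ ?_ (PySem.List.pyRange 0 c 1) a b hI
    intro a b j hI
    obtain ⟨va, ra⟩ := a
    obtain ⟨vb, tb⟩ := b
    obtain ⟨h1, h2⟩ := hI
    dsimp only at h1 h2 ⊢
    subst h1
    by_cases hv : (i, j) ∈ vb
    · simp only [if_pos hv]; exact ⟨trivial, h2⟩
    · simp only [if_neg hv]
      rw [← dfsA_eq_dfsB]
      refine ⟨rfl, ?_⟩
      dsimp only
      rw [h2]
      simp [perimeterA_eq_sidesB]

-- ===== VERDICT (by name: the statement is the Claim_ definition above) =====
theorem solve_spec : Claim_equal_solve := by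
  intro input _ _
  unfold Spec_solve
  exact solve_eq_solve_alt input
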